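-- pv_equiv track=rewrite | github.com/amoughnieh/Bank-Fraud-Detection | utils.py | glasso_groups_func
-- ===== SOURCE A (Python) =====
-- def glasso_groups_func(original_labels, OHE_labels):
--     # List of variables after One-Hot_Encoding (long list)
--     LONG = []
--     # List of original variables in same order as OHE list (short list)
--     SHORT = []
--
--     # dictionary to map original labels to their group number
--     label_to_group = {label: i + 1 for i, label in enumerate(original_labels)}
--
--     for dum_label in OHE_labels:
--         for label in original_labels:
--             if dum_label.startswith(label):
--                 LONG.append(label_to_group[label])
--                 if label not in SHORT:
--                     SHORT.append(label)
--                 break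
--
--     return LONG, SHORT
-- ===== SOURCE B (Python) =====
-- def glasso_groups_func(original_labels, OHE_labels):
--     # Hash index of prefixes: per OHE label, look up each of its prefixes in a
--     # dict instead of scanning the whole original-label list.
--     first = {}   # label -> first index at which it occurs (match tie-break)
--     group = {}   # label -> group number = last index + 1 (as A's dict comprehension)
--     for i, label in enumerate(original_labels):
--         group[label] = i + 1
--         if label not in first:
--             first[label] = i
--     LONG = []
--     SHORT = []
--     for s in OHE_labels:
--         candidates = [first[s[:k]] for k in range(len(s) + 1) if s[:k] in first]
--         if candidates:
--             label = original_labels[min(candidates)]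
--             LONG.append(group[label])
--             if label not in SHORT:
--                 SHORT.append(label)
--     return LONG, SHORT
-- ===== Notes on version B (the rewrite author's own statement) =====
-- stated objective: faster
-- what changed: Replaces the per-OHE-label linear scan over original_labels (startswith against every label) by a prefix hash index built once: each OHE string looks up each of its own prefixes in a dict and takes the minimum-index hit, reproducing A's first-match/last-group-number semantics exactly.
import Mathlib
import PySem

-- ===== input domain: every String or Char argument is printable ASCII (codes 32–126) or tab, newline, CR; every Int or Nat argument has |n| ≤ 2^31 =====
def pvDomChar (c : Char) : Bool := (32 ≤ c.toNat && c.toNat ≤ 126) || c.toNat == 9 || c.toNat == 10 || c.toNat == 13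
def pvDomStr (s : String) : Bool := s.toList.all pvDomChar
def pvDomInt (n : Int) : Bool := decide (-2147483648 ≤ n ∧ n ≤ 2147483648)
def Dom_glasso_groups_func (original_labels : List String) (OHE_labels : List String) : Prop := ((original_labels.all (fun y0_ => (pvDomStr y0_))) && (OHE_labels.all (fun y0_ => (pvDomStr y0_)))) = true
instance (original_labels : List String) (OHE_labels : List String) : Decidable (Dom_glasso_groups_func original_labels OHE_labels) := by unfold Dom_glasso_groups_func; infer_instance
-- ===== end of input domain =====

-- B replaces A's per-OHE-label scan over original_labels by a prefix dict built once
-- (look up each prefix of the OHE string, take the minimum-index hit); objective: faster.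

-- ===== PORT A =====
-- inner loop `for label in original_labels: if dum_label.startswith(label): …; break`
def pvAFind (s : String) : List String → Option String
  | [] => none
  | l :: ls => if PySem.Str.startswith s l then some l else pvAFind s ls

-- `label_to_group = {label: i + 1 for i, label in enumerate(original_labels)}`
def pvADict : List String → Int → PySem.Dict String Int → PySem.Dict String Int
  | [], _, d => d
  | l :: ls, i, d => pvADict ls (i + 1) (d.insert l (i + 1))

-- outer loop over OHE_labels with state (LONG, SHORT)
def pvALoop (labels : List String) (d : PySem.Dict String Int) :
    List String → List Int × List String → List Int × List String
  | [], st => st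
  | s :: rest, st =>
      pvALoop labels d rest
        (match pvAFind s labels with
         | none => st
         | some l =>
             (st.1 ++ [(d.get? l).getD 0],  -- label_to_group[label]: key always present (l ∈ original_labels), KeyError unreachable
              if st.2.contains l then st.2 else st.2 ++ [l]))

def glasso_groups_func (original_labels : List String) (OHE_labels : List String) : List Int × List String :=
  pvALoop original_labels (pvADict original_labels 0 PySem.Dict.empty) OHE_labels ([], [])

-- ===== PORT B =====
-- one pass over enumerate(original_labels) building (first, group)
def pvBBuild : List String → Int → PySem.Dict String Int × PySem.Dict String Int →
    PySem.Dict String Int × PySem.Dict String Int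
  | [], _, st => st
  | l :: ls, i, (f, g) =>
      pvBBuild ls (i + 1) (if f.contains l then f else f.insert l i, g.insert l (i + 1))

-- `candidates = [first[s[:k]] for k in range(len(s) + 1) if s[:k] in first]`
def pvBCands (f : PySem.Dict String Int) (s : String) : List Int :=
  (PySem.List.pyRange 0 (PySem.Str.len s + 1) 1).filterMap
    (fun k => f.get? (PySem.Str.slice s none (some k)))

-- loop over OHE_labels: `if candidates: label = original_labels[min(candidates)]; …`
def pvBLoop (labels : List String) (f g : PySem.Dict String Int) :
    List String → List Int × List String → List Int × List String
  | [], st => st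
  | s :: rest, st =>
      pvBLoop labels f g rest
        (match PySem.List.min? (pvBCands f s) (fun x => x) with
         | none => st
         | some j =>
             let l := PySem.List.pyGetD labels j ""  -- min(candidates) is a valid index (lemma pvMin_eq below), IndexError unreachable
             (st.1 ++ [(g.get? l).getD 0], if st.2.contains l then st.2 else st.2 ++ [l]))

def glasso_groups_func_alt (original_labels : List String) (OHE_labels : List String) : List Int × List String :=
  let fg := pvBBuild original_labels 0 (PySem.Dict.empty, PySem.Dict.empty)
  pvBLoop original_labels fg.1 fg.2 OHE_labels ([], [])

-- ===== PRECONDITION & SPEC =====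
def Spec_glasso_groups_func (original_labels : List String) (OHE_labels : List String) (out : List Int × List String) : Prop := out = glasso_groups_func_alt original_labels OHE_labels
instance (original_labels : List String) (OHE_labels : List String) (out : List Int × List String) : Decidable (Spec_glasso_groups_func original_labels OHE_labels out) := by unfold Spec_glasso_groups_func; infer_instance

-- ===== CLAIM (what is proved, stated in full; the proofs are below) =====
def Claim_equal_glasso_groups_func : Prop := ∀ (original_labels : List String) (OHE_labels : List String), Dom_glasso_groups_func original_labels OHE_labels → Spec_glasso_groups_func original_labels OHE_labels (glasso_groups_func original_labels OHE_labels)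

-- ===== LEMMAS AND PROOFS =====

-- A's inner loop is List.find?
theorem pvAFind_eq_find? (s : String) (ls : List String) :
    pvAFind s ls = ls.find? (fun l => PySem.Str.startswith s l) := by
  induction ls with
  | nil => rfl
  | cons l tl ih => simp [pvAFind, List.find?_cons]; split_ifs <;> simp_all

-- B builds A's group dict as the second component
theorem pvBBuild_snd (ls : List String) : ∀ (i : Int) (f g : PySem.Dict String Int),
    (pvBBuild ls i (f, g)).2 = pvADict ls i g := by
  induction ls with
  | nil => intro i f g; rfl
  | cons l tl ih => intro i f g; simp [pvBBuild, pvADict, ih]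

-- the `first` dict: setdefault semantics = first occurrence index
theorem pvBBuild_fst_get (ls : List String) : ∀ (i : Int) (f g : PySem.Dict String Int) (l : String),
    (pvBBuild ls i (f, g)).1.get? l =
      (f.get? l).or ((ls.findIdx? (fun x => x == l)).map (fun k => i + (k : Int))) := by
  induction ls with
  | nil => intro i f g l; simp [pvBBuild]
  | cons a tl ih =>
    intro i f g l
    simp only [pvBBuild, List.findIdx?_cons]
    by_cases hla : a = l
    · subst hla
      by_cases hc : f.contains a = true
      · obtain ⟨v, hv⟩ : ∃ v, f.get? a = some v := by
          cases hv : f.get? a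
          · rw [PySem.Dict.get?_eq_none_iff_contains] at hv; simp [hc] at hv
          · exact ⟨_, rfl⟩
        simp [hc, ih, hv]
      · have hc' : f.contains a = false := by simpa using hc
        have hn : f.get? a = none := by rw [PySem.Dict.get?_eq_none_iff_contains]; exact hc'
        simp only [hc', Bool.false_eq_true, if_false, ih]
        rw [PySem.Dict.get?_insert_self]
        simp [hn]
    · have hbeq : (a == l) = false := by simp [hla]
      rw [ih]
      have hget : (if f.contains a = true then f else f.insert a i).get? l = f.get? l := by
        split_ifs with hc
        · rfl
        · exact PySem.Dict.get?_insert_of_ne f i (Ne.symm hla)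
      rw [hget, hbeq]
      simp only [if_false, Bool.false_eq_true]
      cases hfi : tl.findIdx? (fun x => x == l) with
      | none => simp
      | some j => simp; congr 1; omega

theorem pvF_get (labels : List String) (l : String) :
    (pvBBuild labels 0 (PySem.Dict.empty, PySem.Dict.empty)).1.get? l =
      (labels.findIdx? (fun x => x == l)).map (fun k => (k : Int)) := by
  rw [pvBBuild_fst_get]
  simp [PySem.Dict.get?_empty]

-- startswith ↔ list prefix
theorem pv_startswith_iff (s l : String) :
    PySem.Str.startswith s l = true ↔ l.toList <+: s.toList := by
  rw [PySem.Str.startswith_eq, PySem.Chars.startswith_iff]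

-- candidate characterization
theorem pvBCands_mem (labels : List String) (s : String) (c : Int) :
    c ∈ pvBCands (pvBBuild labels 0 (PySem.Dict.empty, PySem.Dict.empty)).1 s ↔
      ∃ k : Nat, k ≤ s.toList.length ∧
        (labels.findIdx? (fun x => x == PySem.Str.slice s none (some (k : Int)))).map
          (fun j => (j : Int)) = some c := by
  unfold pvBCands
  rw [List.mem_filterMap]
  constructor
  · rintro ⟨k, hk, hget⟩
    rw [PySem.List.mem_pyRange_one] at hk
    rw [PySem.Str.len_eq] at hk
    refine ⟨k.toNat, by omega, ?_⟩
    rw [pvF_get] at hget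
    have : ((k.toNat : Int)) = k := by omega
    rw [this]; exact hget
  · rintro ⟨k, hk, hfi⟩
    refine ⟨(k : Int), ?_, ?_⟩
    · rw [PySem.List.mem_pyRange_one, PySem.Str.len_eq]; omega
    · rw [pvF_get]; exact hfi

-- slice to take on toList
theorem pv_slice_toList (s : String) (k : Nat) :
    (PySem.Str.slice s none (some (k : Int))).toList = s.toList.take k := by
  simp [PySem.Str.slice, PySem.List.slice_to_natCast]

-- the key lemma: min over the prefix-dict hits = first index with the startswith property
theorem pvMin_eq (labels : List String) (s : String) :
    PySem.List.min? (pvBCands (pvBBuild labels 0 (PySem.Dict.empty, PySem.Dict.empty)).1 s) (fun x => x) =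
      (labels.findIdx? (fun l => PySem.Str.startswith s l)).map (fun k => (k : Int)) := by
  cases h : labels.findIdx? (fun l => PySem.Str.startswith s l) with
  | none =>
    have hnone : ∀ l ∈ labels, PySem.Str.startswith s l = false :=
      List.findIdx?_eq_none_iff.mp h
    have hnil : pvBCands (pvBBuild labels 0 (PySem.Dict.empty, PySem.Dict.empty)).1 s = [] := by
      rw [List.eq_nil_iff_forall_not_mem]
      intro c hc
      rw [pvBCands_mem] at hc
      obtain ⟨k, hk, hfi⟩ := hc
      cases hj : labels.findIdx? (fun x => x == PySem.Str.slice s none (some (k : Int))) with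
      | none => rw [hj] at hfi; simp at hfi
      | some j =>
        obtain ⟨hjl, hpj, -⟩ := List.findIdx?_eq_some_iff_getElem.mp hj
        have heq : labels[j] = PySem.Str.slice s none (some (k : Int)) := by simpa using hpj
        have hsw : PySem.Str.startswith s labels[j] = true := by
          rw [pv_startswith_iff, heq, pv_slice_toList]
          exact List.take_prefix k s.toList
        have hne := hnone labels[j] (List.getElem_mem hjl)
        rw [hne] at hsw
        exact Bool.noConfusion hsw
    rw [hnil]
    simp [PySem.List.min?_eq_none_iff]
  | some i0 =>
    obtain ⟨hi0len, hPi0, hminP⟩ := List.findIdx?_eq_some_iff_getElem.mp h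
    have hpre : labels[i0].toList <+: s.toList := (pv_startswith_iff _ _).mp hPi0
    have hlen : labels[i0].toList.length ≤ s.toList.length := hpre.length_le
    have hslice : PySem.Str.slice s none (some (labels[i0].toList.length : Int)) = labels[i0] := by
      apply String.toList_inj.mp
      rw [pv_slice_toList]
      exact (List.prefix_iff_eq_take.mp hpre).symm
    have hfi : labels.findIdx? (fun x => x == labels[i0]) = some i0 := by
      cases hj : labels.findIdx? (fun x => x == labels[i0]) with
      | none =>
        exfalso
        have := List.findIdx?_eq_none_iff.mp hj labels[i0] (List.getElem_mem hi0len)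
        simp at this
      | some j =>
        obtain ⟨hjl, hpj, hjmin⟩ := List.findIdx?_eq_some_iff_getElem.mp hj
        have hjeq : labels[j] = labels[i0] := by simpa using hpj
        have h1 : ¬ j < i0 := by
          intro hlt
          exact hminP j hlt (by rw [hjeq]; exact hPi0)
        have h2 : ¬ i0 < j := by
          intro hlt
          exact (hjmin i0 hlt) (by simp)
        have : j = i0 := by omega
        rw [this]
    have hmem : (i0 : Int) ∈ pvBCands (pvBBuild labels 0 (PySem.Dict.empty, PySem.Dict.empty)).1 s := by
      rw [pvBCands_mem]
      exact ⟨labels[i0].toList.length, hlen, by rw [hslice, hfi]; rfl⟩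
    have hlb : ∀ c ∈ pvBCands (pvBBuild labels 0 (PySem.Dict.empty, PySem.Dict.empty)).1 s,
        (i0 : Int) ≤ c := by
      intro c hc
      rw [pvBCands_mem] at hc
      obtain ⟨k, hk, hfi'⟩ := hc
      cases hj : labels.findIdx? (fun x => x == PySem.Str.slice s none (some (k : Int))) with
      | none => rw [hj] at hfi'; simp at hfi'
      | some j =>
        rw [hj] at hfi'
        simp at hfi'
        obtain ⟨hjl, hpj, -⟩ := List.findIdx?_eq_some_iff_getElem.mp hj
        have heq : labels[j] = PySem.Str.slice s none (some (k : Int)) := by simpa using hpj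
        have hsw : PySem.Str.startswith s labels[j] = true := by
          rw [pv_startswith_iff, heq, pv_slice_toList]
          exact List.take_prefix k s.toList
        have : ¬ j < i0 := fun hlt => hminP j hlt hsw
        omega
    cases hm : PySem.List.min? (pvBCands (pvBBuild labels 0 (PySem.Dict.empty, PySem.Dict.empty)).1 s)
        (fun x => x) with
    | none =>
      exfalso
      rw [PySem.List.min?_eq_none_iff] at hm
      rw [hm] at hmem
      exact List.not_mem_nil hmem
    | some m =>
      have h1 := PySem.List.min?_mem hm
      have h2 := PySem.List.min?_isMin hm _ hmem
      have h3 := hlb m h1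
      have : m = (i0 : Int) := le_antisymm h2 h3
      rw [this]
      rfl

-- per-element step equality, then outer loops
theorem pvLoop_eq (labels : List String) (ohe : List String) : ∀ (st : List Int × List String),
    pvALoop labels (pvADict labels 0 PySem.Dict.empty) ohe st =
      pvBLoop labels (pvBBuild labels 0 (PySem.Dict.empty, PySem.Dict.empty)).1
        (pvBBuild labels 0 (PySem.Dict.empty, PySem.Dict.empty)).2 ohe st := by
  induction ohe with
  | nil => intro st; rfl
  | cons s rest ih =>
    intro st
    simp only [pvALoop, pvBLoop]
    cases h : labels.findIdx? (fun l => PySem.Str.startswith s l) with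
    | none =>
      have hf : pvAFind s labels = none := by
        rw [pvAFind_eq_find?, List.find?_eq_none]
        intro x hx
        simpa using List.findIdx?_eq_none_iff.mp h x hx
      have hm2 : PySem.List.min?
          (pvBCands (pvBBuild labels 0 (PySem.Dict.empty, PySem.Dict.empty)).1 s) (fun x => x) = none := by
        rw [pvMin_eq, h]; rfl
      simp only [hf, hm2]
      exact ih st
    | some i0 =>
      obtain ⟨hi0, hP, hmin⟩ := List.findIdx?_eq_some_iff_getElem.mp h
      have hf : pvAFind s labels = some labels[i0] := by
        rw [pvAFind_eq_find?, List.find?_eq_some_iff_getElem]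
        exact ⟨hP, i0, hi0, rfl, fun j hj => by simpa using hmin j hj⟩
      have hm2 : PySem.List.min?
          (pvBCands (pvBBuild labels 0 (PySem.Dict.empty, PySem.Dict.empty)).1 s) (fun x => x) =
            some ((i0 : Nat) : Int) := by
        rw [pvMin_eq, h]; rfl
      have hget : PySem.List.pyGetD labels ((i0 : Nat) : Int) "" = labels[i0] := by
        rw [PySem.List.pyGetD_natCast]
        simp [hi0]
      simp only [hf, hm2, hget]
      rw [ih, pvBBuild_snd]

-- ===== VERDICT (by name: the statement is the Claim_ definition above) =====
theorem glasso_groups_func_spec : Claim_equal_glasso_groups_func := by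
  intro original_labels OHE_labels _
  unfold Spec_glasso_groups_func glasso_groups_func glasso_groups_func_alt
  exact pvLoop_eq original_labels OHE_labels ([], [])
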